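-- pv_equiv track=rewrite | github.com/jbjorne/DiMSUM2016 | src/utils/evaluation.py | statistics
-- ===== SOURCE A (Python) =====
-- def statistics(correct, predicted):
--     assert len(correct) == len(predicted)
--     results = {}
--     for label, pred in zip(correct, predicted):
--         if pred not in results:
--             results[pred] = {True:0, False:0}
--         if label != pred:
--             results[pred][False] += 1
--         else:
--             results[pred][True] += 1
--     return results
-- ===== SOURCE B (Python) =====
-- def statistics(correct, predicted):
--     assert len(correct) == len(predicted)
--     counts = {}
--     for label, pred in zip(correct, predicted):
--         key = (pred, label == pred)
--         counts[key] = counts.get(key, 0) + 1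
--     results = {}
--     for pred in dict.fromkeys(predicted):
--         results[pred] = {True: counts.get((pred, True), 0),
--                          False: counts.get((pred, False), 0)}
--     return results
-- ===== Notes on version B (the rewrite author's own statement) =====
-- stated objective: alternative
-- what changed: Replaces A's single incremental loop that mutates nested per-label dicts with two separately-shaped passes: a flat tally keyed by (pred, label==pred), then a reshape pass over the distinct predicted labels (dict.fromkeys order) building each {True,False} row from the tally.
import Mathlib
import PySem

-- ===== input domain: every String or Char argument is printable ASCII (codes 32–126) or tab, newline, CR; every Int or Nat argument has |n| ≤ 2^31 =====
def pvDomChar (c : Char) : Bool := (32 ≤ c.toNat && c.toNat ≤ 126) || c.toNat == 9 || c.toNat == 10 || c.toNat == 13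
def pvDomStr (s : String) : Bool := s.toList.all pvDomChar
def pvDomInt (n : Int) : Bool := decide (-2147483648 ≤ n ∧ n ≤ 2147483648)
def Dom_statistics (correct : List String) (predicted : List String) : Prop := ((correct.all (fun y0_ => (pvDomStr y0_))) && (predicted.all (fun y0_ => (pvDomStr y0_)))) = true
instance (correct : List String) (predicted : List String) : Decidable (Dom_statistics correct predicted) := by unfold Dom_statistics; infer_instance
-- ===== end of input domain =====

-- B re-decomposes A's one incremental nested-dict loop into two passes (flat tally, then reshape); same return value.

-- ===== PORT A =====
def statistics (correct : List String) (predicted : List String) : List (String × List (Bool × Int)) :=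
  let results : PySem.Dict String (PySem.Dict Bool Int) :=
    (correct.zip predicted).foldl (fun results lp =>
      let results :=
        if results.contains lp.2 then results
        else results.insert lp.2 (PySem.Dict.ofList [(true, 0), (false, 0)])
      if lp.1 ≠ lp.2 then
        results.modify lp.2 PySem.Dict.empty (fun m => m.modify false 0 (· + 1))
      else
        results.modify lp.2 PySem.Dict.empty (fun m => m.modify true 0 (· + 1)))
      PySem.Dict.empty
  results.items.map (fun p => (p.1, p.2.items))

-- ===== PORT B =====
def statistics_alt (correct : List String) (predicted : List String) : List (String × List (Bool × Int)) :=
  let counts : PySem.Dict (String × Bool) Int :=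
    (correct.zip predicted).foldl (fun d lp =>
      d.insert (lp.2, lp.1 == lp.2) (d.getD (lp.2, lp.1 == lp.2) 0 + 1))
      PySem.Dict.empty
  (PySem.List.dedup predicted).map (fun p =>
    (p, [(true, counts.getD (p, true) 0), (false, counts.getD (p, false) 0)]))

-- ===== PRECONDITION & SPEC =====
-- Pre_: A's leading assert raises AssertionError when the two lists differ in length.
def Pre_statistics (correct : List String) (predicted : List String) : Prop :=
  correct.length = predicted.length
instance (correct : List String) (predicted : List String) : Decidable (Pre_statistics correct predicted) := by unfold Pre_statistics; infer_instance
def pvWitness_statistics : List String × List String := (["a", "b"], ["a", "a"])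

def Spec_statistics (correct : List String) (predicted : List String) (out : List (String × List (Bool × Int))) : Prop := out = statistics_alt correct predicted
instance (correct : List String) (predicted : List String) (out : List (String × List (Bool × Int))) : Decidable (Spec_statistics correct predicted out) := by unfold Spec_statistics; infer_instance

-- ===== CLAIM (what is proved, stated in full; the proofs are below) =====
def Claim_equal_statistics : Prop := ∀ (correct : List String) (predicted : List String), Dom_statistics correct predicted → Pre_statistics correct predicted → Spec_statistics correct predicted (statistics correct predicted)

-- ===== LEMMAS AND PROOFS =====

def keyf (lp : String × String) : String × Bool := (lp.2, lp.1 == lp.2)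

def entryA (l : List (String × String)) (p : String) : String × PySem.Dict Bool Int :=
  (p, PySem.Dict.mk [(true, ((l.map keyf).count (p, true) : Int)),
                     (false, ((l.map keyf).count (p, false) : Int))])

lemma count_keyf_eq_zero (l : List (String × String)) (p : String) (b : Bool)
    (h : p ∉ l.map Prod.snd) : (l.map keyf).count (p, b) = 0 := by
  rw [List.count_eq_zero]
  intro hmem
  rcases List.mem_map.1 hmem with ⟨lp, hlp, hk⟩
  exact h (List.mem_map.2 ⟨lp, hlp, by simpa [keyf] using congrArg Prod.fst hk⟩)

lemma entryA_append_ne (t : List (String × String)) (x : String × String) (p : String)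
    (h : p ≠ x.2) : entryA (t ++ [x]) p = entryA t p := by
  simp [entryA, keyf, List.count_append, List.count_cons, Prod.ext_iff, Ne.symm h]

lemma keysD (t : List (String × String)) :
    (PySem.Dict.mk ((PySem.Set.ofList (t.map Prod.snd)).map (entryA t))).keys
    = PySem.Set.ofList (t.map Prod.snd) := by
  simp [PySem.Dict.keys, PySem.Dict.items, Function.comp_def, entryA]

lemma containsD (t : List (String × String)) (p : String) :
    (PySem.Dict.mk ((PySem.Set.ofList (t.map Prod.snd)).map (entryA t))).contains p
    = decide (p ∈ t.map Prod.snd) := by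
  rw [PySem.Dict.contains_eq_decide_mem_keys, keysD]
  simp [PySem.Set.mem_ofList]

lemma getD_D (t : List (String × String)) (p : String) (h : p ∈ t.map Prod.snd) :
    (PySem.Dict.mk ((PySem.Set.ofList (t.map Prod.snd)).map (entryA t))).getD p PySem.Dict.empty
    = (entryA t p).2 := by
  apply PySem.Dict.getD_of_mem_items
  · exact List.mem_map.2 ⟨p, by simp [PySem.Set.mem_ofList, h], by simp [entryA]⟩
  · rw [keysD]; exact PySem.Set.nodup_ofList _

lemma countsB_gen (l : List (String × String)) (d : PySem.Dict (String × Bool) Int) (k : String × Bool) :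
    ((l.foldl (fun d lp => d.insert (lp.2, lp.1 == lp.2) (d.getD (lp.2, lp.1 == lp.2) 0 + 1)) d).getD k 0)
    = d.getD k 0 + ((l.map keyf).count k : Int) := by
  induction l generalizing d with
  | nil => simp
  | cons x t ih =>
    simp only [List.foldl_cons, ih, List.map_cons, keyf]
    rw [PySem.Dict.getD_insert]
    by_cases hk : k = (x.2, x.1 == x.2)
    · simp [hk, List.count_cons]
      ring
    · simp [hk, Ne.symm hk]

lemma countsB (l : List (String × String)) (k : String × Bool) :
    ((l.foldl (fun d lp => d.insert (lp.2, lp.1 == lp.2) (d.getD (lp.2, lp.1 == lp.2) 0 + 1)) PySem.Dict.empty).getD k 0)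
    = ((l.map keyf).count k : Int) := by
  rw [countsB_gen]; simp


lemma foldA (l : List (String × String)) :
    l.foldl (fun results lp =>
      let results := if results.contains lp.2 then results
        else results.insert lp.2 (PySem.Dict.ofList [(true, 0), (false, 0)])
      if lp.1 ≠ lp.2 then
        results.modify lp.2 PySem.Dict.empty (fun m => m.modify false 0 (· + 1))
      else
        results.modify lp.2 PySem.Dict.empty (fun m => m.modify true 0 (· + 1)))
      PySem.Dict.empty
    = PySem.Dict.mk ((PySem.Set.ofList (l.map Prod.snd)).map (entryA l)) := by
  induction l using List.reverseRecOn with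
  | nil => rfl
  | append_singleton t x ih =>
    rw [List.foldl_append, ih]
    simp only [List.foldl_cons, List.foldl_nil]
    have hof : PySem.Set.ofList ((t ++ [x]).map Prod.snd)
        = if x.2 ∈ t.map Prod.snd then PySem.Set.ofList (t.map Prod.snd)
          else PySem.Set.ofList (t.map Prod.snd) ++ [x.2] := by
      rw [List.map_append, PySem.Set.ofList_eq_foldl, List.foldl_append,
        ← PySem.Set.ofList_eq_foldl]
      simp only [List.map_cons, List.map_nil, List.foldl_cons, List.foldl_nil, PySem.Set.add,
        PySem.Set.contains_eq_decide, PySem.Set.mem_ofList]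
      split_ifs with h <;> simp_all
    rw [hof]
    by_cases hmem : x.2 ∈ t.map Prod.snd <;> by_cases heq : x.1 = x.2 <;>
      simp only [containsD, hmem, decide_true, decide_false, if_true, if_false, heq, ne_eq,
        not_true_eq_false, not_false_eq_true, ite_true, ite_false, PySem.Dict.modify]
    · 
      rw [getD_D t x.2 hmem]
      apply PySem.Dict.ext
      rw [PySem.Dict.items_insert_of_contains _ _ (by rw [containsD]; simp [hmem])]
      simp only [PySem.Dict.items, List.map_map]
      apply List.map_congr_left
      intro p hp
      by_cases hpx : p = x.2
      · subst hpx
        simp [Function.comp_def, entryA, keyf, heq, List.count_append, List.count_cons,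
          Prod.ext_iff, PySem.Dict.insert, PySem.Dict.getD, PySem.Dict.get?, PySem.Dict.contains]
      · simp only [Function.comp_def, entryA_append_ne t x p hpx]
        simp [entryA, hpx]
    · 
      rw [getD_D t x.2 hmem]
      apply PySem.Dict.ext
      rw [PySem.Dict.items_insert_of_contains _ _ (by rw [containsD]; simp [hmem])]
      simp only [PySem.Dict.items, List.map_map]
      apply List.map_congr_left
      intro p hp
      by_cases hpx : p = x.2
      · subst hpx
        simp [Function.comp_def, entryA, keyf, heq, List.count_append, List.count_cons,
          Prod.ext_iff, PySem.Dict.insert, PySem.Dict.getD, PySem.Dict.get?, PySem.Dict.contains]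
      · simp only [Function.comp_def, entryA_append_ne t x p hpx]
        simp [entryA, hpx]
    · 
      simp only [Bool.false_eq_true, if_false]
      rw [PySem.Dict.getD_insert_self, PySem.Dict.insert_insert_self]
      apply PySem.Dict.ext
      rw [PySem.Dict.items_insert_of_not_contains _ _ (by rw [containsD]; simp [hmem])]
      simp only [PySem.Dict.items, List.map_append, List.map_cons, List.map_nil]
      congr 1
      · apply List.map_congr_left
        intro p hp
        have hpx : p ≠ x.2 := fun h => hmem (h ▸ (PySem.Set.mem_ofList _ _).1 hp)
        exact (entryA_append_ne t x p hpx).symm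
      · simp [entryA, keyf, heq, List.count_append, List.count_cons, Prod.ext_iff,
          count_keyf_eq_zero t x.2 true hmem, count_keyf_eq_zero t x.2 false hmem,
          PySem.Dict.ofList, PySem.Dict.insert, PySem.Dict.getD, PySem.Dict.get?,
          PySem.Dict.contains, PySem.Dict.empty, PySem.Dict.items, PySem.Dict.update]
    · 
      simp only [Bool.false_eq_true, if_false]
      rw [PySem.Dict.getD_insert_self, PySem.Dict.insert_insert_self]
      apply PySem.Dict.ext
      rw [PySem.Dict.items_insert_of_not_contains _ _ (by rw [containsD]; simp [hmem])]
      simp only [PySem.Dict.items, List.map_append, List.map_cons, List.map_nil]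
      congr 1
      · apply List.map_congr_left
        intro p hp
        have hpx : p ≠ x.2 := fun h => hmem (h ▸ (PySem.Set.mem_ofList _ _).1 hp)
        exact (entryA_append_ne t x p hpx).symm
      · simp [entryA, keyf, heq, List.count_append, List.count_cons, Prod.ext_iff,
          count_keyf_eq_zero t x.2 true hmem, count_keyf_eq_zero t x.2 false hmem,
          PySem.Dict.ofList, PySem.Dict.insert, PySem.Dict.getD, PySem.Dict.get?,
          PySem.Dict.contains, PySem.Dict.empty, PySem.Dict.items, PySem.Dict.update]

-- ===== VERDICT (by name: the statement is the Claim_ definition above) =====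
theorem statistics_spec : Claim_equal_statistics := by
  intro c p _ hpre
  unfold Spec_statistics statistics statistics_alt
  have hsnd : (c.zip p).map Prod.snd = p := List.map_snd_zip (le_of_eq hpre.symm)
  rw [foldA]
  simp only [PySem.Dict.items, List.map_map, PySem.List.dedup, hsnd]
  apply List.map_congr_left
  intro q hq
  have h1 := countsB (c.zip p) (q, true)
  have h2 := countsB (c.zip p) (q, false)
  simp [Function.comp_def, entryA, PySem.Dict.items, h1, h2]
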